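-- pv_equiv track=rewrite | github.com/orbitaldecay/fngi | fnpy/env.py | getPo2
-- ===== SOURCE A (Python) =====
-- def getPo2(size: int) -> int:
--     if size <= 0:
--         raise ValueError(size)
--
--     x = 1
--     exponent = 0
--     while True:
--         if x >= size:
--             return exponent
--         x = x * 2
--         exponent += 1
-- ===== SOURCE B (Python) =====
-- def getPo2(size: int) -> int:
--     if size <= 0:
--         raise ValueError(size)
--     return (size - 1).bit_length()
-- ===== Notes on version B (the rewrite author's own statement) =====
-- stated objective: idiomatic
-- what changed: Replaces the doubling loop maintaining x/exponent state with the closed-form expression (size - 1).bit_length(), which is exactly the smallest e with 2^e >= size.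
import Mathlib
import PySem

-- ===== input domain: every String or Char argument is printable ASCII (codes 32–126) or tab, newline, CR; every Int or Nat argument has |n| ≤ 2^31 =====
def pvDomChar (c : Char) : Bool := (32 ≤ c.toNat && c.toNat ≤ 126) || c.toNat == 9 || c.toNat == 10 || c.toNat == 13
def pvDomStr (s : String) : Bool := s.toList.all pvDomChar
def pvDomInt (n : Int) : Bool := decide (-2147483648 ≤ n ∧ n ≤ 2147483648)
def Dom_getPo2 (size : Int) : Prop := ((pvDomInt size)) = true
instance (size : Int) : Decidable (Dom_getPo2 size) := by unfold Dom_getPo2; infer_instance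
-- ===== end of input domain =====

-- B replaces A's doubling loop with the closed form (size-1).bit_length(); equal on all size > 0
-- (A raises ValueError on size ≤ 0, which Pre_ excludes).

-- ===== PORT A =====
-- the `while True` loop of A; `hx : 0 < x` records the loop invariant needed for termination
def getPo2_loop (size x e : Int) (hx : 0 < x) : Int :=
  if x ≥ size then e
  else getPo2_loop size (x * 2) (e + 1) (by omega)
termination_by (size - x).toNat
decreasing_by omega

def getPo2 (size : Int) : Int :=
  if size ≤ 0 then 0  -- Python raises ValueError here; excluded by Pre_getPo2
  else getPo2_loop size 1 0 (by omega)

-- ===== PORT B =====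
-- (size - 1).bit_length() = Nat.size of the (nonnegative) integer size - 1
def getPo2_alt (size : Int) : Int :=
  if size ≤ 0 then 0  -- Python raises ValueError here; excluded by Pre_getPo2
  else ((size - 1).toNat.size : Int)

-- ===== PRECONDITION & SPEC =====
-- A raises ValueError exactly when size ≤ 0
def Pre_getPo2 (size : Int) : Prop := 0 < size
instance (size : Int) : Decidable (Pre_getPo2 size) := by unfold Pre_getPo2; infer_instance
def pvWitness_getPo2 : Int := (5)

def Spec_getPo2 (size : Int) (out : Int) : Prop := out = getPo2_alt size
instance (size : Int) (out : Int) : Decidable (Spec_getPo2 size out) := by unfold Spec_getPo2; infer_instance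

-- ===== CLAIM (what is proved, stated in full; the proofs are below) =====
def Claim_equal_getPo2 : Prop := ∀ (size : Int), Dom_getPo2 size → Pre_getPo2 size → Spec_getPo2 size (getPo2 size)

-- ===== LEMMAS AND PROOFS =====

-- size q = size (q/2) + 1 for q ≠ 0
theorem size_div_two_succ (q : Nat) (h : q ≠ 0) : Nat.size q = Nat.size (q / 2) + 1 := by
  conv_lhs => rw [← Nat.bit_decide_mod_two_eq_one_shiftRight_one q]
  rw [Nat.size_bit (by rwa [Nat.bit_decide_mod_two_eq_one_shiftRight_one])]
  rw [Nat.shiftRight_one]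

-- invariant of A's loop: it returns e plus the bit length of (size-1)/x
theorem getPo2_loop_eq (size x e : Int) (hx : 0 < x) :
    getPo2_loop size x e hx = e + ((size - 1).toNat / x.toNat).size := by
  refine getPo2_loop.induct size
    (motive := fun x e hx => getPo2_loop size x e hx = e + ((size - 1).toNat / x.toNat).size)
    ?_ ?_ x e hx
  · intro x e hx hge
    rw [getPo2_loop, if_pos hge]
    have h0 : (size - 1).toNat / x.toNat = 0 := Nat.div_eq_of_lt (by omega)
    rw [h0, Nat.size_zero]
    simp
  · intro x e hx hge ih
    rw [getPo2_loop, if_neg hge, ih]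
    have hx2 : (x * 2).toNat = x.toNat * 2 := by omega
    have hq : (size - 1).toNat / x.toNat ≠ 0 := by
      rw [Nat.ne_zero_iff_zero_lt, Nat.lt_div_iff_mul_lt (by omega)]
      omega
    rw [hx2, ← Nat.div_div_eq_div_mul, size_div_two_succ _ hq]
    push_cast
    ring

-- ===== VERDICT (by name: the statement is the Claim_ definition above) =====
theorem getPo2_spec : Claim_equal_getPo2 := by
  intro size _ hpre
  unfold Pre_getPo2 at hpre
  unfold Spec_getPo2 getPo2 getPo2_alt
  rw [if_neg (by omega), if_neg (by omega), getPo2_loop_eq]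
  simp
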